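-- pv_equiv track=rewrite | github.com/ioistired/python-snippets | parse_emotes.py | parse_emotes
-- ===== SOURCE A (Python) =====
-- import string
--
-- EMOTE_ALLOWED = set(string.ascii_lowercase) | set(string.ascii_uppercase) | set(string.digits)
--
-- DELIMS = set(':;')
--
-- IGNORED = {'<': '>', '`': '`'}
--
-- def parse_emotes(text):
-- 	parsed = []
-- 	i = 0
-- 	while i < len(text):
-- 		c = text[i]
-- 		if c in DELIMS:
-- 			delim = c
-- 			i += 1
--
-- 			current_emote = []
-- 			while i < len(text) and text[i] != delim:
-- 				if text[i] not in EMOTE_ALLOWED: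
-- 					parsed.append(text[i])
-- 					break
-- 				current_emote.append(text[i])
-- 				i += 1
-- 			parsed.append('<<'+''.join(current_emote)+'>>')
-- 		elif c in IGNORED:
-- 			closer = IGNORED[c]
-- 			i += 1
-- 			while i < len(text) and text[i] != closer:
-- 				parsed.append(text[i])
-- 				i += 1
-- 		else:
-- 			parsed.append(text[i])
-- 			i += 1
--
-- 	return ''.join(parsed)
-- ===== SOURCE B (Python) =====
-- def parse_emotes(text):
--     out = []
--     i = 0
--     state = 'NORMAL'
--     delim = None
--     buf = []
--     closer = None
--     while True:
--         if state == 'NORMAL':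
--             if i >= len(text):
--                 break
--             c = text[i]
--             if c in ':;':
--                 state, delim, buf = 'EMOTE', c, []
--             elif c == '<':
--                 state, closer = 'IGN', '>'
--             elif c == '`':
--                 state, closer = 'IGN', '`'
--             else:
--                 out.append(c)
--             i += 1
--         elif state == 'EMOTE':
--             if i >= len(text):
--                 out.append('<<' + ''.join(buf) + '>>')
--                 break
--             c = text[i]
--             if c == delim:
--                 out.append('<<' + ''.join(buf) + '>>')
--                 buf = []
--                 i += 1
--             elif not (c.isascii() and c.isalnum()):
--                 out.append(c)
--                 out.append('<<' + ''.join(buf) + '>>')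
--                 state = 'NORMAL'
--             else:
--                 buf.append(c)
--                 i += 1
--         else:  # IGN
--             if i >= len(text):
--                 break
--             c = text[i]
--             if c == closer:
--                 state = 'NORMAL'
--             else:
--                 out.append(c)
--                 i += 1
--     return ''.join(out)
-- ===== Notes on version B (the rewrite author's own statement) =====
-- stated objective: alternative
-- what changed: A's nested while-loops (inner scans for the emote body and the ignored span) are replaced by a single flat loop over the text driven by an explicit state variable (NORMAL / EMOTE with active delimiter and buffer / IGNORED with expected closer), reproducing the close-reopens-emote, emit-disallowed-char-then-marker and end-of-text-flush behaviours via state transitions instead of inner loops.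
import Mathlib
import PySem

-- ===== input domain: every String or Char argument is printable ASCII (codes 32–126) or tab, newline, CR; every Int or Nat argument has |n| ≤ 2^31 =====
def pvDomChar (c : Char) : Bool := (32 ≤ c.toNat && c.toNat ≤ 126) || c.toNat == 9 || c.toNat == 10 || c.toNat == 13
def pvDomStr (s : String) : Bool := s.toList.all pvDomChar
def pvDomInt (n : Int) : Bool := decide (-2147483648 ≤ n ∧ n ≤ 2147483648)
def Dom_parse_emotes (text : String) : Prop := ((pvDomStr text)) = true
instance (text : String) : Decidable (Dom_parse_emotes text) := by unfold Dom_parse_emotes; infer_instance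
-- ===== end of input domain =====

-- B replaces A's nested scanning loops by a single flat state machine (NORMAL / IN_EMOTE / IN_IGNORED); objective: alternative decomposition, same cost.

-- ===== PORT A =====
-- c in EMOTE_ALLOWED (ASCII letters and digits)
def aAllowed (c : Char) : Bool := c.isAlpha || c.isDigit

-- A's inner emote loop: returns (chars appended on break, final current_emote, remaining text)
def aEmoteLoop (d : Char) (acc : List Char) : List Char → List Char × List Char × List Char
  | [] => ([], acc, [])
  | c :: cs =>
    if c == d then ([], acc, c :: cs)
    else if !aAllowed c then ([c], acc, c :: cs)
    else aEmoteLoop d (acc ++ [c]) cs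

-- A's inner ignored loop: returns (chars appended, remaining text starting at the closer if found)
def aIgnLoop (closer : Char) (acc : List Char) : List Char → List Char × List Char
  | [] => (acc, [])
  | c :: cs =>
    if c == closer then (acc, c :: cs)
    else aIgnLoop closer (acc ++ [c]) cs

theorem aEmoteLoop_rest_le : ∀ (cs : List Char) (d : Char) (acc : List Char),
    (aEmoteLoop d acc cs).2.2.length ≤ cs.length := by
  intro cs
  induction cs with
  | nil => intro d acc; simp [aEmoteLoop]
  | cons c cs ih =>
    intro d acc
    simp only [aEmoteLoop]
    split
    · simp
    · split
      · simp
      · exact Nat.le_succ_of_le (ih d (acc ++ [c]))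

theorem aIgnLoop_rest_le : ∀ (cs : List Char) (closer : Char) (acc : List Char),
    (aIgnLoop closer acc cs).2.length ≤ cs.length := by
  intro cs
  induction cs with
  | nil => intro closer acc; simp [aIgnLoop]
  | cons c cs ih =>
    intro closer acc
    simp only [aIgnLoop]
    split
    · simp
    · exact Nat.le_succ_of_le (ih closer (acc ++ [c]))

-- A's outer while loop
def goA : List Char → List Char
  | [] => []
  | c :: cs =>
    if c == ':' || c == ';' then
      let r := aEmoteLoop c [] cs
      r.1 ++ ('<' :: '<' :: r.2.1 ++ ['>', '>']) ++ goA r.2.2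
    else if c == '<' then
      let r := aIgnLoop '>' [] cs
      r.1 ++ goA r.2
    else if c == '`' then
      let r := aIgnLoop '`' [] cs
      r.1 ++ goA r.2
    else c :: goA cs
termination_by cs => cs.length
decreasing_by
  · exact Nat.lt_succ_of_le (aEmoteLoop_rest_le cs c [])
  · exact Nat.lt_succ_of_le (aIgnLoop_rest_le cs '>' [])
  · exact Nat.lt_succ_of_le (aIgnLoop_rest_le cs '`' [])
  · exact Nat.lt_succ_self _

def parse_emotes (text : String) : String := String.ofList (goA text.toList)

-- ===== PORT B =====
-- the state variable of B's flat loop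
inductive BSt where
  | normal : BSt
  | emote : Char → List Char → BSt   -- active delimiter, character buffer
  | ign : Char → BSt                 -- expected closer
deriving Repr, DecidableEq

def bWeight : BSt → Nat
  | .normal => 0
  | _ => 1

def bAllowed (c : Char) : Bool := c.isAlpha || c.isDigit

-- B's single flat loop: one step per character (or per state change without consuming)
def goB : BSt → List Char → List Char
  | .normal, [] => []
  | .normal, c :: cs =>
    if c == ':' || c == ';' then goB (.emote c []) cs
    else if c == '<' then goB (.ign '>') cs
    else if c == '`' then goB (.ign '`') cs
    else c :: goB .normal cs
  | .emote _ buf, [] => '<' :: '<' :: buf ++ ['>', '>']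
  | .emote d buf, c :: cs =>
    if c == d then ('<' :: '<' :: buf ++ ['>', '>']) ++ goB (.emote d []) cs
    else if !bAllowed c then
      c :: (('<' :: '<' :: buf ++ ['>', '>']) ++ goB .normal (c :: cs))
    else goB (.emote d (buf ++ [c])) cs
  | .ign _, [] => []
  | .ign closer, c :: cs =>
    if c == closer then goB .normal (c :: cs)
    else c :: goB (.ign closer) cs
termination_by st cs => 2 * cs.length + bWeight st
decreasing_by all_goals (simp [bWeight]; try omega)

def parse_emotes_alt (text : String) : String := String.ofList (goB .normal text.toList)

-- ===== PRECONDITION & SPEC =====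
def Spec_parse_emotes (text : String) (out : String) : Prop := out = parse_emotes_alt text
instance (text : String) (out : String) : Decidable (Spec_parse_emotes text out) := by unfold Spec_parse_emotes; infer_instance

-- ===== CLAIM (what is proved, stated in full; the proofs are below) =====
def Claim_equal_parse_emotes : Prop := ∀ (text : String), Dom_parse_emotes text → Spec_parse_emotes text (parse_emotes text)

-- ===== LEMMAS AND PROOFS =====

theorem aIgnLoop_acc (cs : List Char) : ∀ (closer : Char) (a b : List Char),
    aIgnLoop closer (a ++ b) cs =
      (a ++ (aIgnLoop closer b cs).1, (aIgnLoop closer b cs).2) := by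
  induction cs with
  | nil => intro closer a b; simp [aIgnLoop]
  | cons c cs ih =>
    intro closer a b
    simp only [aIgnLoop]
    split
    · simp
    · rw [List.append_assoc]
      exact ih closer a (b ++ [c])

def L1 (cs : List Char) : Prop := goB .normal cs = goA cs

def L2 (cs : List Char) : Prop := ∀ (d : Char) (buf : List Char), (d = ':' ∨ d = ';') →
  goB (.emote d buf) cs =
    (aEmoteLoop d buf cs).1 ++ ('<' :: '<' :: (aEmoteLoop d buf cs).2.1 ++ ['>', '>'])
      ++ goA (aEmoteLoop d buf cs).2.2

def L3 (cs : List Char) : Prop := ∀ (closer : Char),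
  goB (.ign closer) cs = (aIgnLoop closer [] cs).1 ++ goA (aIgnLoop closer [] cs).2

theorem main_lemma : ∀ (n : Nat) (cs : List Char), cs.length ≤ n → L1 cs ∧ L2 cs ∧ L3 cs := by
  intro n
  induction n with
  | zero =>
    intro cs h
    have : cs = [] := List.eq_nil_of_length_eq_zero (Nat.le_zero.mp h)
    subst this
    refine ⟨by unfold L1; rw [goB, goA], ?_, ?_⟩
    · intro d buf _; simp [goB, aEmoteLoop, goA]
    · intro closer; simp [goB, aIgnLoop, goA]
  | succ n ih =>
    intro cs h
    match cs with
    | [] =>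
      refine ⟨by unfold L1; rw [goB, goA], ?_, ?_⟩
      · intro d buf _; simp [goB, aEmoteLoop, goA]
      · intro closer; simp [goB, aIgnLoop, goA]
    | c :: cs =>
      have hlen : cs.length ≤ n := Nat.succ_le_succ_iff.mp h
      obtain ⟨ih1, ih2, ih3⟩ := ih cs hlen
      rw [L1] at ih1
      have h1 : goB .normal (c :: cs) = goA (c :: cs) := by
        rw [goB, goA]
        split_ifs with hdc h2c h3c
        · have hd : c = ':' ∨ c = ';' := by
            rcases Bool.or_eq_true_iff.mp hdc with h' | h'
            · exact Or.inl (beq_iff_eq.mp h')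
            · exact Or.inr (beq_iff_eq.mp h')
          simpa using ih2 c [] hd
        · simpa using ih3 '>'
        · simpa using ih3 '`'
        · rw [ih1]
      refine ⟨h1, ?_, ?_⟩
      · -- L2 at c :: cs
        intro d buf hd
        by_cases hc : (c == d) = true
        · -- closing delimiter: emit marker and re-open
          have hcd : c = d := beq_iff_eq.mp hc
          subst hcd
          have hdelim : (c == ':' || c == ';') = true := by
            rcases hd with h' | h' <;> simp [h']
          have hE : aEmoteLoop c buf (c :: cs) = ([], buf, c :: cs) := by
            rw [aEmoteLoop, if_pos (by simp)]
          rw [goB, if_pos (by simp), hE, ih2 c [] hd, goA]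
          simp [hdelim, List.append_assoc]
        · by_cases hal : bAllowed c = true
          · -- allowed character: extend the buffer
            have hE : aEmoteLoop d buf (c :: cs) = aEmoteLoop d (buf ++ [c]) cs := by
              rw [aEmoteLoop, if_neg hc,
                if_neg (by simp [show aAllowed c = true from hal])]
            rw [goB, if_neg hc, if_neg (by simp [hal]), hE]
            exact ih2 d (buf ++ [c]) hd
          · -- disallowed character: emit it, emit the marker, reprocess it
            have hf : bAllowed c = false := by revert hal; cases bAllowed c <;> simp
            have hE : aEmoteLoop d buf (c :: cs) = ([c], buf, c :: cs) := by
              rw [aEmoteLoop, if_neg hc,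
                if_pos (by simp [show aAllowed c = false from hf])]
            rw [goB, if_neg hc, if_pos (by simp [hf]), hE, h1]
            simp [List.append_assoc]
      · -- L3 at c :: cs
        intro closer
        by_cases hc : (c == closer) = true
        · have hE : aIgnLoop closer [] (c :: cs) = ([], c :: cs) := by
            rw [aIgnLoop, if_pos hc]
          rw [goB, if_pos hc, hE, h1]
          simp
        · have hE : aIgnLoop closer [] (c :: cs)
              = (c :: (aIgnLoop closer [] cs).1, (aIgnLoop closer [] cs).2) := by
            rw [aIgnLoop, if_neg hc]
            simpa using aIgnLoop_acc cs closer [c] []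
          rw [goB, if_neg hc, hE, ih3 closer]
          simp

-- ===== VERDICT (by name: the statement is the Claim_ definition above) =====
theorem parse_emotes_spec : Claim_equal_parse_emotes := by
  intro text _
  unfold Spec_parse_emotes parse_emotes parse_emotes_alt
  have := (main_lemma text.toList.length text.toList le_rfl).1
  rw [L1] at this
  rw [this]
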